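-- pv_equiv track=rewrite | github.com/EarlRagnar78/RumblingStone | Script/pdf-to-md-engine/src/enhanced_processor.py | _merge_partial_numbering_lines
-- ===== SOURCE A (Python) =====
-- def _merge_partial_numbering_lines(text: str) -> str:
--     """Merge MasterFormat-style partial numbering with following text"""
--     import re
--     partial_pattern = re.compile(r"^\.\d+$")
--     lines = text.split("\n")
--     result_lines = []
--     i = 0
--
--     while i < len(lines):
--         line = lines[i]
--         stripped = line.strip()
--
--         if partial_pattern.match(stripped):
--             # Look for next non-empty line to merge
--             j = i + 1
--             while j < len(lines) and not lines[j].strip():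
--                 j += 1
--
--             if j < len(lines):
--                 next_line = lines[j].strip()
--                 result_lines.append(f"{stripped} {next_line}")
--                 i = j + 1
--             else:
--                 result_lines.append(line)
--                 i += 1
--         else:
--             result_lines.append(line)
--             i += 1
--
--     return "\n".join(result_lines)
-- ===== SOURCE B (Python) =====
-- def _merge_partial_numbering_lines(text: str) -> str:
--     """Merge MasterFormat-style partial numbering with following text.
--     Single left-to-right pass with an explicit pending-partial state
--     instead of an index loop with an inner rescan."""
--     out = []
--     pending = None          # (stripped partial, original line) awaiting a non-empty line
--     skipped = []            # blank lines seen while pending (restored if never resolved)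
--     for line in text.split("\n"):
--         s = line.strip()
--         if pending is not None:
--             if s:
--                 out.append(pending[0] + " " + s)
--                 pending = None
--                 skipped = []
--             else:
--                 skipped.append(line)
--         elif s.startswith(".") and s[1:].isdigit():
--             pending = (s, line)
--         else:
--             out.append(line)
--     if pending is not None:
--         out.append(pending[1])
--         out.extend(skipped)
--     return "\n".join(out)
-- ===== Notes on version B (the rewrite author's own statement) =====
-- stated objective: alternative
-- what changed: Replaced the index-driven while loop with an inner blank-line rescan and index jump (i = j + 1) by a single declarative pass over the lines that carries a pending-partial state (plus the blank lines skipped under it), flushing the unresolved state at the end.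
import Mathlib
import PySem

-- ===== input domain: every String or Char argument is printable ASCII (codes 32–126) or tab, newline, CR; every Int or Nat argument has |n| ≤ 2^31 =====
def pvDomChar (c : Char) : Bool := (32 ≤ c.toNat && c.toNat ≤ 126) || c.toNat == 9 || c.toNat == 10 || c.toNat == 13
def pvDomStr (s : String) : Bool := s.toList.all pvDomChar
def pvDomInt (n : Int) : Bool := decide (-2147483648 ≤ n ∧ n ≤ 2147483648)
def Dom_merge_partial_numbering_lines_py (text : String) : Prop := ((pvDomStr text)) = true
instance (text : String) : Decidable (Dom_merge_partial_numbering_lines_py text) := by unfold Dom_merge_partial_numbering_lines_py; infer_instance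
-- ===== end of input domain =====

-- B replaces A's index loop (with its inner blank-line rescan and index jump) by a single
-- left-to-right fold carrying a pending-partial state; return values proved equal on Dom.


-- ===== PORT A =====
-- re.match(r"^\.\d+$", stripped): '.' followed by one or more digits, nothing else.
-- Exact on the ASCII domain, where \d is '0'..'9' (PySem.Chars.isdigit).
def pvIsPartialA (s : String) : Bool :=
  match s.toList with
  | '.' :: ds => !ds.isEmpty && ds.all PySem.Chars.isdigit
  | _ => false

-- A's inner 'while j < len(lines) and not lines[j].strip(): j += 1' followed by the
-- 'j < len(lines)' test: first non-blank line of the suffix together with what follows it.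
def pvSkipBlank : List String → Option (String × List String)
  | [] => none
  | x :: xs => if PySem.Str.strip x = "" then pvSkipBlank xs else some (x, xs)

lemma pvSkipBlank_length : ∀ (xs : List String) (nx : String) (ys : List String),
    pvSkipBlank xs = some (nx, ys) → ys.length < xs.length := by
  intro xs
  induction xs with
  | nil => intro nx ys h; simp [pvSkipBlank] at h
  | cons x xs ih =>
    intro nx ys h
    by_cases hx : PySem.Str.strip x = ""
    · simp [pvSkipBlank, hx] at h
      have := ih nx ys h
      simpa using Nat.lt_succ_of_lt this
    · simp [pvSkipBlank, hx] at h
      simp [← h.2]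

-- A's outer while loop over the remaining suffix of lines.
def pvALoop : List String → List String
  | [] => []
  | line :: rest =>
    let s := PySem.Str.strip line
    if pvIsPartialA s then
      match h : pvSkipBlank rest with
      | some (nx, rest') => (s ++ " " ++ PySem.Str.strip nx) :: pvALoop rest'
      | none => line :: pvALoop rest
    else line :: pvALoop rest
termination_by xs => xs.length
decreasing_by
  · exact Nat.lt_succ_of_lt (pvSkipBlank_length _ _ _ h)
  · simp
  · simp

-- text.split("\n"): sep "\n" ≠ "", so split? is always some; getD's default is unreachable.
def merge_partial_numbering_lines_py (text : String) : String :=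
  PySem.Str.join "\n" (pvALoop ((PySem.Str.split? text "\n").getD []))

-- ===== PORT B =====
-- s.startswith(".") and s[1:].isdigit()
def pvIsPartialB (s : String) : Bool :=
  PySem.Str.startswith s "." && PySem.Str.strIsdigit (PySem.Str.slice s (some 1) none)

-- state = (out, pending (stripped, original), skipped blank lines)
def pvBStep (st : List String × Option (String × String) × List String) (line : String) :
    List String × Option (String × String) × List String :=
  let s := PySem.Str.strip line
  match st with
  | (out, some p, skipped) =>
    if s ≠ "" then (out ++ [p.1 ++ " " ++ s], none, [])
    else (out, some p, skipped ++ [line])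
  | (out, none, skipped) =>
    if pvIsPartialB s then (out, some (s, line), skipped)
    else (out ++ [line], none, skipped)

-- the final 'if pending is not None' flush
def pvBFlush : List String × Option (String × String) × List String → List String
  | (out, some p, skipped) => out ++ [p.2] ++ skipped
  | (out, none, _) => out

def merge_partial_numbering_lines_py_alt (text : String) : String :=
  PySem.Str.join "\n"
    (pvBFlush (((PySem.Str.split? text "\n").getD []).foldl pvBStep ([], none, [])))

-- ===== PRECONDITION & SPEC =====
def Spec_merge_partial_numbering_lines_py (text : String) (out : String) : Prop := out = merge_partial_numbering_lines_py_alt text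
instance (text : String) (out : String) : Decidable (Spec_merge_partial_numbering_lines_py text out) := by unfold Spec_merge_partial_numbering_lines_py; infer_instance

-- ===== CLAIM (what is proved, stated in full; the proofs are below) =====
def Claim_equal_merge_partial_numbering_lines_py : Prop := ∀ (text : String), Dom_merge_partial_numbering_lines_py text → Spec_merge_partial_numbering_lines_py text (merge_partial_numbering_lines_py text)

-- ===== LEMMAS AND PROOFS =====

-- the two partial-line tests agree on every string
lemma pvIsPartial_eq (s : String) : pvIsPartialB s = pvIsPartialA s := by
  unfold pvIsPartialB pvIsPartialA
  rw [show PySem.Str.startswith s "." = PySem.Chars.startswith s.toList ['.'] from by simp,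
      show PySem.Str.strIsdigit (PySem.Str.slice s (some 1) none)
           = PySem.Chars.strIsdigit (PySem.Str.slice s (some 1) none).toList from by simp]
  rw [show (PySem.Str.slice s (some 1) none).toList = s.toList.drop 1 from by
        simp [PySem.List.slice_from s.toList (a := 1) (by norm_num)]]
  cases h : s.toList with
  | nil => simp [PySem.Chars.startswith, PySem.Chars.strIsdigit]
  | cons c cs =>
    by_cases hc : c = '.'
    · subst hc
      simp [PySem.Chars.startswith, PySem.Chars.strIsdigit]
    · simp [PySem.Chars.startswith, PySem.Chars.strIsdigit, hc]
      intro h'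
      exact absurd h'.symm hc

lemma pvIsPartialA_empty : pvIsPartialA "" = false := by decide

-- a run of blank lines passes through A's loop unchanged
lemma pvALoop_blank (xs : List String) (h : pvSkipBlank xs = none) : pvALoop xs = xs := by
  induction xs with
  | nil => rw [pvALoop]
  | cons x xs ih =>
    have hx : PySem.Str.strip x = "" := by
      by_cases hx : PySem.Str.strip x = ""
      · exact hx
      · simp [pvSkipBlank, hx] at h
    have hxs : pvSkipBlank xs = none := by simpa [pvSkipBlank, hx] using h
    rw [pvALoop, hx]
    simp [pvIsPartialA_empty, ih hxs]

-- B's fold in the pending state resolves exactly as A's inner blank-line scan does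
lemma pvBPending (rest : List String) : ∀ (out : List String) (p : String × String)
    (skipped : List String),
    pvBFlush (rest.foldl pvBStep (out, some p, skipped)) =
      match pvSkipBlank rest with
      | some (nx, rest') =>
          pvBFlush (rest'.foldl pvBStep (out ++ [p.1 ++ " " ++ PySem.Str.strip nx], none, []))
      | none => out ++ [p.2] ++ skipped ++ rest := by
  induction rest with
  | nil => intro out p skipped; simp [pvSkipBlank, pvBFlush]
  | cons x xs ih =>
    intro out p skipped
    by_cases hx : PySem.Str.strip x = ""
    · simp only [List.foldl_cons, pvBStep, pvSkipBlank, hx, ne_eq, not_true_eq_false,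
        if_false, if_true]
      rw [ih]
      cases h : pvSkipBlank xs with
      | some v => simp
      | none => simp
    · simp only [List.foldl_cons, pvBStep, pvSkipBlank, if_neg hx, ne_eq, ite_not]

-- main invariant: B's fold from the idle state computes A's loop, appended to out
lemma pvMain : ∀ (n : Nat) (lines : List String), lines.length ≤ n → ∀ (out : List String),
    pvBFlush (lines.foldl pvBStep (out, none, [])) = out ++ pvALoop lines := by
  intro n
  induction n with
  | zero =>
    intro lines h out
    have : lines = [] := List.eq_nil_of_length_eq_zero (Nat.le_zero.mp h)
    subst this; simp [pvBFlush, pvALoop]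
  | succ n ih =>
    intro lines h out
    cases lines with
    | nil => simp [pvBFlush, pvALoop]
    | cons line rest =>
      have hrest : rest.length ≤ n := by simpa using h
      by_cases hp : pvIsPartialA (PySem.Str.strip line) = true
      · simp only [List.foldl_cons, pvBStep, pvIsPartial_eq, hp, if_true]
        rw [pvBPending]
        cases hsb : pvSkipBlank rest with
        | some v =>
          obtain ⟨nx, rest'⟩ := v
          have hlt : rest'.length < rest.length := pvSkipBlank_length _ _ _ hsb
          dsimp only
          rw [ih rest' (by omega)]
          rw [pvALoop, if_pos hp, hsb]
          simp
        | none =>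
          dsimp only
          rw [pvALoop, if_pos hp, hsb, pvALoop_blank rest hsb]
          simp
      · simp only [List.foldl_cons, pvBStep, pvIsPartial_eq]
        rw [if_neg hp, ih rest hrest, pvALoop, if_neg hp]
        simp

-- ===== VERDICT (by name: the statement is the Claim_ definition above) =====
theorem merge_partial_numbering_lines_py_spec : Claim_equal_merge_partial_numbering_lines_py := by
  intro text _
  unfold Spec_merge_partial_numbering_lines_py merge_partial_numbering_lines_py
    merge_partial_numbering_lines_py_alt
  rw [pvMain ((PySem.Str.split? text "\n").getD []).length _ le_rfl []]
  simp
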